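-- pv_equiv track=rewrite | github.com/DataDog/datadog-agent | tasks/components.py | find_doc
-- ===== SOURCE A (Python) =====
-- def find_doc(content) -> str:
--     comment_block = []
--     first_paragraph_only = True
--
--     for line in content:
--         if line.startswith('//'):
--             text = line[3:].strip()
--             if not text:
--                 first_paragraph_only = False
--             if first_paragraph_only:
--                 comment_block.append(text + '\n')
--         elif line.startswith('package '):
--             break
--         else:
--             comment_block = []
--             first_paragraph_only = True
--     return ''.join(comment_block).strip() + '\n'
-- ===== SOURCE B (Python) =====
-- def find_doc(content) -> str:
--     # 1. cut at the first 'package ' line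
--     pre = []
--     for line in content:
--         if line.startswith('package '):
--             break
--         pre.append(line)
--     # 2. maximal contiguous run of '//' lines ending at the cutoff
--     run = []
--     for line in reversed(pre):
--         if not line.startswith('//'):
--             break
--         run.append(line)
--     run.reverse()
--     # 3. first paragraph: texts up to the first blank comment
--     texts = []
--     for line in run:
--         t = line[3:].strip()
--         if not t:
--             break
--         texts.append(t)
--     return ''.join(t + '\n' for t in texts).strip() + '\n'
-- ===== Notes on version B (the rewrite author's own statement) =====
-- stated objective: alternative
-- what changed: Instead of one stateful forward pass (flag + block reset on every non-comment line), B cuts at the first 'package ' line, walks backward to collect the trailing contiguous '//' run, and takes the first paragraph of it forward.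
import Mathlib
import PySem

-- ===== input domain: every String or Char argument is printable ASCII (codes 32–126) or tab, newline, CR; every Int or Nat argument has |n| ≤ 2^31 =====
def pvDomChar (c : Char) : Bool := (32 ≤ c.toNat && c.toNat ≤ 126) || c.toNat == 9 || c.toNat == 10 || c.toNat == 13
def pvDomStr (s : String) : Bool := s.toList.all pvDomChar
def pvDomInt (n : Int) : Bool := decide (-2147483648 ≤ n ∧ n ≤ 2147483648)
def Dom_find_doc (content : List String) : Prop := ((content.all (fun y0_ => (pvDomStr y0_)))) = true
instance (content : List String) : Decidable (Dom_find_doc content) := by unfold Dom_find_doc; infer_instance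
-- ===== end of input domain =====

-- B re-decomposes A's single stateful pass as cut-at-package / backward comment run / first paragraph; same O(n) cost.

-- ===== PORT A =====
-- the for-loop of A: state = (comment_block, first_paragraph_only); break on 'package ' returns the block
def findDocLoopA : List String → List String → Bool → List String
  | [], block, _ => block
  | line :: rest, block, firstPara =>
    if PySem.Str.startswith line "//" then
      let text := PySem.Str.strip (PySem.Str.slice line (some 3) none)
      let firstPara' := if text = "" then false else firstPara
      let block' := if firstPara' then block ++ [text ++ "\n"] else block
      findDocLoopA rest block' firstPara'
    else if PySem.Str.startswith line "package " then block
    else findDocLoopA rest [] true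

def find_doc (content : List String) : String :=
  PySem.Str.strip (PySem.Str.join "" (findDocLoopA content [] true)) ++ "\n"

-- ===== PORT B =====
-- Source B loop 1: lines before the first 'package ' line
def preLoop : List String → List String
  | [] => []
  | line :: rest =>
    if PySem.Str.startswith line "package " then [] else line :: preLoop rest

-- Source B loop 2 (runs over reversed(pre)): collect while the line starts with '//'
def runLoop : List String → List String
  | [] => []
  | line :: rest =>
    if !(PySem.Str.startswith line "//") then [] else line :: runLoop rest

-- Source B loop 3: comment texts up to the first blank one
def textsLoop : List String → List String
  | [] => []
  | line :: rest =>
    let t := PySem.Str.strip (PySem.Str.slice line (some 3) none)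
    if t = "" then [] else t :: textsLoop rest

def find_doc_alt (content : List String) : String :=
  let pre := preLoop content
  let run := (runLoop pre.reverse).reverse
  let texts := textsLoop run
  PySem.Str.strip (PySem.Str.join "" (texts.map (· ++ "\n"))) ++ "\n"

-- ===== PRECONDITION & SPEC =====
def Spec_find_doc (content : List String) (out : String) : Prop := out = find_doc_alt content
instance (content : List String) (out : String) : Decidable (Spec_find_doc content out) := by unfold Spec_find_doc; infer_instance

-- ===== CLAIM (what is proved, stated in full; the proofs are below) =====
def Claim_equal_find_doc : Prop := ∀ (content : List String), Dom_find_doc content → Spec_find_doc content (find_doc content)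

-- ===== LEMMAS AND PROOFS =====

-- abbreviation for "is a comment line"
def isCom (l : String) : Bool := PySem.Str.startswith l "//"

-- A's loop with the (unreachable after preLoop) 'package ' break removed
def gLoop : List String → List String → Bool → List String
  | [], block, _ => block
  | line :: rest, block, firstPara =>
    if isCom line then
      let text := PySem.Str.strip (PySem.Str.slice line (some 3) none)
      let firstPara' := if text = "" then false else firstPara
      let block' := if firstPara' then block ++ [text ++ "\n"] else block
      gLoop rest block' firstPara'
    else gLoop rest [] true

-- a line cannot start with both "//" and "package "
theorem com_not_pkg (l : String) (h : PySem.Str.startswith l "//" = true) :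
    PySem.Str.startswith l "package " = false := by
  by_contra hp
  rw [Bool.not_eq_false] at hp
  rw [PySem.Str.startswith_eq] at h hp
  obtain ⟨t1, e1⟩ := (PySem.Chars.startswith_iff _ _).mp h
  obtain ⟨t2, e2⟩ := (PySem.Chars.startswith_iff _ _).mp hp
  rw [← e1] at e2
  simp at e2

-- A's loop = gLoop over the prefix before the first 'package ' line
theorem loopA_eq_gLoop (content : List String) :
    ∀ block flag, findDocLoopA content block flag = gLoop (preLoop content) block flag := by
  induction content with
  | nil => intro block flag; rfl
  | cons line rest ih =>
    intro block flag
    by_cases hc : PySem.Str.startswith line "//" = true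
    · have hp := com_not_pkg line hc
      simp only [findDocLoopA, preLoop, gLoop, isCom, hc, hp, Bool.false_eq_true, if_true,
        if_false]
      exact ih _ _
    · rw [Bool.not_eq_true] at hc
      by_cases hpk : PySem.Str.startswith line "package " = true
      · simp only [findDocLoopA, preLoop, gLoop, hc, hpk, Bool.false_eq_true, if_true, if_false]
      · rw [Bool.not_eq_true] at hpk
        simp only [findDocLoopA, preLoop, gLoop, isCom, hc, hpk, Bool.false_eq_true, if_false]
        exact ih _ _

theorem runLoop_append_all (xs ys : List String) (h : ∀ x ∈ xs, isCom x = true) :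
    runLoop (xs ++ ys) = xs ++ runLoop ys := by
  induction xs with
  | nil => rfl
  | cons x xs ih =>
    have hx : PySem.Str.startswith x "//" = true := h x (List.mem_cons_self ..)
    simp only [List.cons_append, runLoop, hx, Bool.not_true, Bool.false_eq_true, if_false]
    rw [ih (fun y hy => h y (List.mem_cons_of_mem _ hy))]

theorem runLoop_all (xs : List String) (h : ∀ x ∈ xs, isCom x = true) : runLoop xs = xs := by
  have := runLoop_append_all xs [] h
  simpa [runLoop] using this

theorem runLoop_append_stop (xs ys : List String) (h : ∃ x ∈ xs, isCom x = false) :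
    runLoop (xs ++ ys) = runLoop xs := by
  induction xs with
  | nil => simp at h
  | cons x xs ih =>
    by_cases hx : PySem.Str.startswith x "//" = true
    · simp only [List.cons_append, runLoop, hx, Bool.not_true, Bool.false_eq_true, if_false]
      have hxs : ∃ y ∈ xs, isCom y = false := by
        obtain ⟨y, hy, hyc⟩ := h
        rcases List.mem_cons.mp hy with rfl | hy'
        · simp only [isCom] at hyc; rw [hx] at hyc; simp at hyc
        · exact ⟨y, hy', hyc⟩
      rw [ih hxs]
    · rw [Bool.not_eq_true] at hx
      simp only [List.cons_append, runLoop, hx, Bool.not_false, if_true]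

theorem runLoop_mem (xs : List String) : ∀ x ∈ runLoop xs, isCom x = true := by
  induction xs with
  | nil => intro x hx; simp [runLoop] at hx
  | cons y ys ih =>
    intro x hx
    by_cases hy : PySem.Str.startswith y "//" = true
    · simp only [runLoop, hy, Bool.not_true, Bool.false_eq_true, if_false, List.mem_cons] at hx
      rcases hx with rfl | hx
      · simpa [isCom] using hy
      · exact ih x hx
    · rw [Bool.not_eq_true] at hy
      simp only [runLoop, hy, Bool.not_false, if_true] at hx
      simp at hx

theorem gLoop_false (pre : List String) (h : ∀ l ∈ pre, isCom l = true) :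
    ∀ acc, gLoop pre acc false = acc := by
  induction pre with
  | nil => intro acc; rfl
  | cons l rest ih =>
    intro acc
    have hl : isCom l = true := h l (List.mem_cons_self ..)
    have hrest := fun y hy => h y (List.mem_cons_of_mem l hy)
    simp only [gLoop, hl, if_true]
    by_cases ht : PySem.Str.strip (PySem.Str.slice l (some 3) none) = ""
    · simp only [ht, if_true, Bool.false_eq_true, if_false]
      exact ih hrest acc
    · simp only [ht, if_false, Bool.false_eq_true]
      exact ih hrest acc

theorem gLoop_true (pre : List String) (h : ∀ l ∈ pre, isCom l = true) :
    ∀ acc, gLoop pre acc true = acc ++ (textsLoop pre).map (· ++ "\n") := by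
  induction pre with
  | nil => intro acc; simp [gLoop, textsLoop]
  | cons l rest ih =>
    intro acc
    have hl : isCom l = true := h l (List.mem_cons_self ..)
    have hrest := fun y hy => h y (List.mem_cons_of_mem l hy)
    simp only [gLoop, textsLoop, hl, if_true]
    by_cases ht : PySem.Str.strip (PySem.Str.slice l (some 3) none) = ""
    · simp only [ht, if_true, Bool.false_eq_true, if_false, List.map_nil, List.append_nil]
      exact gLoop_false rest hrest acc
    · simp only [ht, if_false, if_true]
      rw [ih hrest]
      simp

theorem gLoop_reset (pre : List String) (h : ∃ l ∈ pre, isCom l = false) :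
    ∀ acc flag, gLoop pre acc flag = gLoop ((runLoop pre.reverse).reverse) [] true := by
  induction pre with
  | nil => simp at h
  | cons l rest ih =>
    intro acc flag
    by_cases hl : isCom l = true
    · have hrest : ∃ y ∈ rest, isCom y = false := by
        obtain ⟨y, hy, hyc⟩ := h
        rcases List.mem_cons.mp hy with rfl | hy'
        · rw [hl] at hyc; simp at hyc
        · exact ⟨y, hy', hyc⟩
      have hrev : ∃ y ∈ rest.reverse, isCom y = false := by
        obtain ⟨y, hy, hyc⟩ := hrest
        exact ⟨y, List.mem_reverse.mpr hy, hyc⟩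
      have hrun : runLoop ((l :: rest).reverse) = runLoop rest.reverse := by
        rw [List.reverse_cons]
        exact runLoop_append_stop _ _ hrev
      rw [hrun]
      simp only [gLoop, hl, if_true]
      exact ih hrest _ _
    · rw [Bool.not_eq_true] at hl
      simp only [gLoop, hl, Bool.false_eq_true, if_false]
      by_cases hrest : ∀ y ∈ rest, isCom y = true
      · have hrun : runLoop ((l :: rest).reverse) = rest.reverse := by
          rw [List.reverse_cons,
            runLoop_append_all _ _ (fun y hy => hrest y (List.mem_reverse.mp hy))]
          have hl' : PySem.Str.startswith l "//" = false := hl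
          simp only [runLoop, hl', Bool.not_false, if_true, List.append_nil]
        rw [hrun, List.reverse_reverse]
      · push Not at hrest
        have hrest' : ∃ y ∈ rest, isCom y = false := by
          obtain ⟨y, hy, hyc⟩ := hrest
          exact ⟨y, hy, by simpa using hyc⟩
        have hrev : ∃ y ∈ rest.reverse, isCom y = false := by
          obtain ⟨y, hy, hyc⟩ := hrest'
          exact ⟨y, List.mem_reverse.mpr hy, hyc⟩
        have hrun : runLoop ((l :: rest).reverse) = runLoop rest.reverse := by
          rw [List.reverse_cons]
          exact runLoop_append_stop _ _ hrev
        rw [hrun]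
        exact ih hrest' _ _

-- ===== VERDICT (by name: the statement is the Claim_ definition above) =====
theorem find_doc_spec : Claim_equal_find_doc := by
  intro content _
  show find_doc content = find_doc_alt content
  simp only [find_doc, find_doc_alt]
  rw [loopA_eq_gLoop]
  by_cases hall : ∀ l ∈ preLoop content, isCom l = true
  · rw [gLoop_true _ hall,
      runLoop_all _ (fun y hy => hall y (List.mem_reverse.mp hy)), List.reverse_reverse]
    simp
  · push Not at hall
    have hex : ∃ l ∈ preLoop content, isCom l = false := by
      obtain ⟨y, hy, hyc⟩ := hall
      exact ⟨y, hy, by simpa using hyc⟩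
    rw [gLoop_reset _ hex,
      gLoop_true _ (fun y hy => runLoop_mem _ y (List.mem_reverse.mp hy))]
    simp
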